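-- pv_equiv track=rewrite | github.com/azimxxd/watashigpt | action-middleware/main.py | _extract_chain_payload
-- ===== SOURCE A (Python) =====
-- def _resolve_prefix(text: str, commands: dict) -> tuple[str, str, dict] | None:
--     """Match a prefix at the start of text. Returns (cmd_name, payload, cmd_config) or None.
--
--     Handles leading whitespace and optional space after prefix colon.
--     E.g. "  SUM: hello" and "SUM:hello" both match.
--     """
--     stripped = text.lstrip()
--     text_upper = stripped.upper()
--     # Sort prefixes by length descending to match longest prefix first
--     # (e.g. "TONE:casual:" before "TONE:")
--     candidates: list[tuple[str, str, dict]] = []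
--     for name, cmd in commands.items():
--         for prefix in cmd.get("prefixes", []):
--             prefix_upper = prefix.upper()
--             if text_upper.startswith(prefix_upper):
--                 payload = stripped[len(prefix):]
--                 # Allow optional space after prefix (e.g. "SUM: text" and "SUM:text")
--                 if payload.startswith(" "):
--                     payload = payload[1:]
--                 candidates.append((name, payload, cmd, len(prefix)))
--     if not candidates:
--         return None
--     # Return the longest matching prefix
--     candidates.sort(key=lambda c: c[3], reverse=True)
--     return candidates[0][0], candidates[0][1], candidates[0][2]
--
-- def _extract_chain_payload(text: str, commands: dict) -> str:
--     """Extract the payload text from a chain like 'POL:|SUM: the actual text'."""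
--     remaining = text
--     while True:
--         pipe_pos = remaining.find("|")
--         if pipe_pos == -1:
--             break
--         candidate = remaining[:pipe_pos]
--         if _resolve_prefix(candidate, commands):
--             remaining = remaining[pipe_pos + 1:]
--         else:
--             break
--     # remaining is now "SUM: the actual text" — strip the last prefix
--     match = _resolve_prefix(remaining, commands)
--     if match:
--         return match[1]  # payload after prefix
--     return remaining
-- ===== SOURCE B (Python) =====
-- def _resolve_prefix(text: str, commands: dict) -> tuple[str, str, dict] | None:
--     """Match a prefix at the start of text. Returns (cmd_name, payload, cmd_config) or None."""
--     stripped = text.lstrip()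
--     text_upper = stripped.upper()
--     candidates: list[tuple[str, str, dict]] = []
--     for name, cmd in commands.items():
--         for prefix in cmd.get("prefixes", []):
--             prefix_upper = prefix.upper()
--             if text_upper.startswith(prefix_upper):
--                 payload = stripped[len(prefix):]
--                 if payload.startswith(" "):
--                     payload = payload[1:]
--                 candidates.append((name, payload, cmd, len(prefix)))
--     if not candidates:
--         return None
--     candidates.sort(key=lambda c: c[3], reverse=True)
--     return candidates[0][0], candidates[0][1], candidates[0][2]
--
-- def _extract_chain_payload(text: str, commands: dict) -> str:
--     """Split once on '|' and walk an index over the segments instead of repeated find/slice."""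
--     segments = text.split('|')
--     i = 0
--     while i < len(segments) - 1 and _resolve_prefix(segments[i], commands):
--         i += 1
--     remaining = '|'.join(segments[i:])
--     match = _resolve_prefix(remaining, commands)
--     if match:
--         return match[1]
--     return remaining
-- ===== Notes on version B (the rewrite author's own statement) =====
-- stated objective: simpler
-- what changed: B splits the text once on '|' and walks an index over the precomputed segments (rejoining the tail with '|'.join), instead of A's while-loop that repeatedly re-finds the first '|' and re-slices the remaining string; _resolve_prefix is kept unchanged.
import Mathlib
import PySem

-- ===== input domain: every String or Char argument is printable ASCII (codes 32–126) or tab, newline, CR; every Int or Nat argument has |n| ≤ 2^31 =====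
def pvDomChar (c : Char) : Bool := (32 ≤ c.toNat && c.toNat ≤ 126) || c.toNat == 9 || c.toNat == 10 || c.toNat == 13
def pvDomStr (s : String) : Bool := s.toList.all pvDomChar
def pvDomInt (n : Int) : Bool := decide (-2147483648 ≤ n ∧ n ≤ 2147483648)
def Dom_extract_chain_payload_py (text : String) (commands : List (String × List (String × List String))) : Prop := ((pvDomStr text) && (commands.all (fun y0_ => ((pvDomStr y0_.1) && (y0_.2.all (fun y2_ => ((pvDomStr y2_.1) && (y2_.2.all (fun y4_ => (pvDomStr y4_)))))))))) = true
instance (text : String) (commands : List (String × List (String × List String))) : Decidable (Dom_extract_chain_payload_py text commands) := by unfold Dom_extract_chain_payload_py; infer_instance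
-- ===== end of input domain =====

-- B replaces A's repeated find('|')/slice loop by one split('|') plus an index walk over the
-- segments (objective: simpler); _resolve_prefix is identical in Source A and Source B, ported once and shared.

-- ===== PORT A =====
-- shared helper: port of _resolve_prefix (identical in Source A and Source B); strings handled as List Char
def resolvePrefixPy (text : List Char) (commands : List (String × List (String × List String))) :
    Option (String × List Char × List (String × List String)) :=
  let stripped := PySem.Chars.lstrip text
  let textUpper := PySem.Chars.upper stripped
  let candidates :=
    commands.foldl (fun (acc : List (String × List Char × List (String × List String) × Nat)) nc =>
      (PySem.Dict.getD (PySem.Dict.mk nc.2) "prefixes" ([] : List String)).foldl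
        (fun (acc2 : List (String × List Char × List (String × List String) × Nat)) (pfx : String) =>
          let pfxUpper := PySem.Chars.upper pfx.toList
          if PySem.Chars.startswith textUpper pfxUpper then
            let payload := PySem.Chars.slice stripped (some (pfx.toList.length : Int)) none
            let payload := if PySem.Chars.startswith payload [' '] then
                PySem.Chars.slice payload (some 1) none else payload
            acc2 ++ [(nc.1, payload, nc.2, pfx.toList.length)]
          else acc2) acc) []
  if candidates.isEmpty then none
  else
    match PySem.List.sorted candidates (fun c => c.2.2.2) true with
    | [] => none
    | c :: _ => some (c.1, c.2.1, c.2.2.1)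

-- the common code after A's while-loop: strip the last prefix from `remaining`
def finalA (s : List Char) (cmds : List (String × List (String × List String))) : List Char :=
  match resolvePrefixPy s cmds with
  | some m => m.2.1
  | none => s

-- A's while-loop: find the first '|', consume the segment if it resolves, else break
def chainA (s : List Char) (cmds : List (String × List (String × List String))) : List Char :=
  let p := PySem.Chars.find s ['|']
  if hp : p = -1 then finalA s cmds
  else
    if (resolvePrefixPy (PySem.Chars.slice s none (some p)) cmds).isSome then
      chainA (PySem.Chars.slice s (some (p + 1)) none) cmds
    else finalA s cmds
termination_by s.length
decreasing_by
  have h0 : (0:Int) ≤ PySem.Chars.find s ['|'] := by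
    have := PySem.Chars.neg_one_le_find s ['|']
    omega
  have hsp := PySem.Chars.find_spec (s := s) (sub := ['|']) h0
  have hlt : (PySem.Chars.find s ['|']).toNat < s.length := by
    rcases hsp.1 with ⟨t, ht⟩
    by_contra hle
    rw [List.drop_eq_nil_of_le (by omega)] at ht
    simp at ht
  simp only [PySem.Chars.slice_eq_listSlice,
    PySem.List.slice_from s (show (0:Int) ≤ PySem.Chars.find s ['|'] + 1 by omega)]
  simp only [List.length_drop]
  omega

def extract_chain_payload_py (text : String) (commands : List (String × List (String × List String))) : String :=
  String.ofList (chainA text.toList commands)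

-- ===== PORT B =====
-- Source B: while i < len(segments) - 1 and _resolve_prefix(segments[i], commands): i += 1
def walkIdx (segs : List (List Char)) (cmds : List (String × List (String × List String))) (i : Nat) : Nat :=
  if h : i < segs.length - 1 then
    if (resolvePrefixPy (segs[i]'(by omega)) cmds).isSome then walkIdx segs cmds (i + 1) else i
  else i
termination_by segs.length - i

def chainB (s : List Char) (cmds : List (String × List (String × List String))) : List Char :=
  let segs := PySem.Chars.splitOn s ['|']
  let i := walkIdx segs cmds 0
  let remaining := PySem.Chars.join ['|'] (PySem.List.slice segs (some (i : Int)) none)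
  match resolvePrefixPy remaining cmds with
  | some m => m.2.1
  | none => remaining

def extract_chain_payload_py_alt (text : String) (commands : List (String × List (String × List String))) : String :=
  String.ofList (chainB text.toList commands)

-- ===== PRECONDITION & SPEC =====
def Spec_extract_chain_payload_py (text : String) (commands : List (String × List (String × List String))) (out : String) : Prop := out = extract_chain_payload_py_alt text commands
instance (text : String) (commands : List (String × List (String × List String))) (out : String) : Decidable (Spec_extract_chain_payload_py text commands out) := by unfold Spec_extract_chain_payload_py; infer_instance

-- ===== CLAIM (what is proved, stated in full; the proofs are below) =====
def Claim_equal_extract_chain_payload_py : Prop := ∀ (text : String) (commands : List (String × List (String × List String))), Dom_extract_chain_payload_py text commands → Spec_extract_chain_payload_py text commands (extract_chain_payload_py text commands)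

-- ===== LEMMAS AND PROOFS =====

-- reference splitter: split a char list at every '|'
def splitPipe : List Char → List (List Char)
  | [] => [[]]
  | c :: rest => if c = '|' then [] :: splitPipe rest else (splitPipe rest).modifyHead (c :: ·)

theorem splitPipe_ne_nil (s : List Char) : splitPipe s ≠ [] := by
  cases s with
  | nil => simp [splitPipe]
  | cons c rest =>
    simp only [splitPipe]
    split
    · simp
    · cases h : splitPipe rest with
      | nil => exact absurd h (splitPipe_ne_nil rest)
      | cons y ys => simp

theorem splitPipe_pipe_cons (rest : List Char) : splitPipe ('|' :: rest) = [] :: splitPipe rest := by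
  simp [splitPipe]

theorem splitPipe_cons_of_ne (c : Char) (rest : List Char) (hc : c ≠ '|') :
    splitPipe (c :: rest) = (splitPipe rest).modifyHead (c :: ·) := by
  simp [splitPipe, hc]

theorem splitOn_go_eq (fuel : Nat) (l cur : List Char) (acc : List (List Char))
    (hf : l.length < fuel) :
    PySem.Chars.splitOn.go ['|'] fuel l cur acc
      = acc.reverse ++ (splitPipe l).modifyHead (cur.reverse ++ ·) := by
  induction fuel generalizing l cur acc with
  | zero => omega
  | succ fuel ih =>
    cases l with
    | nil => simp [PySem.Chars.splitOn.go, splitPipe]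
    | cons c rest =>
      by_cases hc : c = '|'
      · subst hc
        rw [show PySem.Chars.splitOn.go ['|'] (fuel+1) ('|' :: rest) cur acc
              = PySem.Chars.splitOn.go ['|'] fuel (List.drop 1 ('|'::rest)) [] (cur.reverse :: acc) by
            simp [PySem.Chars.splitOn.go, List.isPrefixOf]]
        rw [ih _ _ _ (by simp at hf ⊢; omega)]
        simp [splitPipe_pipe_cons]
        cases h : splitPipe rest with
        | nil => exact absurd h (splitPipe_ne_nil rest)
        | cons y ys => simp
      · rw [show PySem.Chars.splitOn.go ['|'] (fuel+1) (c :: rest) cur acc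
              = PySem.Chars.splitOn.go ['|'] fuel rest (c :: cur) acc by
            simp [PySem.Chars.splitOn.go, List.isPrefixOf, Ne.symm hc]]
        rw [ih _ _ _ (by simp at hf ⊢; omega)]
        simp only [splitPipe_cons_of_ne c rest hc, List.modifyHead_modifyHead]
        cases h : splitPipe rest with
        | nil => exact absurd h (splitPipe_ne_nil rest)
        | cons y ys => simp

theorem splitOn_pipe (s : List Char) : PySem.Chars.splitOn s ['|'] = splitPipe s := by
  rw [PySem.Chars.splitOn, splitOn_go_eq _ _ _ _ (by omega)]
  cases h : splitPipe s with
  | nil => exact absurd h (splitPipe_ne_nil s)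
  | cons y ys => simp

theorem splitPipe_no_pipe (s : List Char) (h : '|' ∉ s) : splitPipe s = [s] := by
  induction s with
  | nil => rfl
  | cons c rest ih =>
    simp only [List.mem_cons, not_or] at h
    simp [splitPipe, Ne.symm h.1, ih h.2]

theorem splitPipe_append (a b : List Char) (h : '|' ∉ a) :
    splitPipe (a ++ '|' :: b) = a :: splitPipe b := by
  induction a with
  | nil => simp [splitPipe]
  | cons c a' ih =>
    simp only [List.mem_cons, not_or] at h
    simp [splitPipe, Ne.symm h.1, ih h.2]

theorem joinPipe (s : List Char) : PySem.Chars.join ['|'] (splitPipe s) = s := by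
  induction s with
  | nil => simp [splitPipe, PySem.Chars.join_singleton]
  | cons c rest ih =>
    by_cases hc : c = '|'
    · subst hc
      rw [splitPipe_pipe_cons]
      cases h : splitPipe rest with
      | nil => exact absurd h (splitPipe_ne_nil rest)
      | cons y ys =>
        rw [h] at ih
        rw [PySem.Chars.join_cons_cons, ← ih]
        simp
    · rw [splitPipe_cons_of_ne c rest hc]
      cases h : splitPipe rest with
      | nil => exact absurd h (splitPipe_ne_nil rest)
      | cons y ys =>
        rw [h] at ih
        cases ys with
        | nil => simp_all [PySem.Chars.join_singleton, List.modifyHead]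
        | cons z zs =>
          rw [PySem.Chars.join_cons_cons] at ih
          simp only [List.modifyHead]
          rw [PySem.Chars.join_cons_cons, ← ih]
          simp

theorem find_pipe_neg (s : List Char) (h : PySem.Chars.find s ['|'] = -1) : '|' ∉ s := by
  intro hm
  exact (PySem.Chars.find_eq_neg_one_iff s ['|']).mp h ((List.singleton_infix_iff _ _).mpr hm)

theorem find_pipe_decomp (s : List Char) (h : PySem.Chars.find s ['|'] ≠ -1) :
    '|' ∉ s.take (PySem.Chars.find s ['|']).toNat ∧
    s = s.take (PySem.Chars.find s ['|']).toNat ++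
        '|' :: s.drop ((PySem.Chars.find s ['|']).toNat + 1) := by
  have h0 : (0:Int) ≤ PySem.Chars.find s ['|'] := by
    have := PySem.Chars.neg_one_le_find s ['|']; omega
  obtain ⟨hpre, hmin⟩ := PySem.Chars.find_spec (s := s) (sub := ['|']) h0
  set n := (PySem.Chars.find s ['|']).toNat with hn
  obtain ⟨t, ht⟩ := hpre
  simp only [List.singleton_append] at ht
  have hd : s.drop n = '|' :: t := ht.symm
  have hlt : n < s.length := by
    by_contra hle
    rw [List.drop_eq_nil_of_le (by omega)] at hd
    simp at hd
  constructor
  · intro hm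
    obtain ⟨j, hj, hget⟩ := List.getElem_of_mem hm
    have hjn : j < n := by
      have := List.length_take (i := n) (l := s)
      omega
    have hjlen : j < s.length := by omega
    have hgj : s[j] = '|' := by
      rw [← hget]; exact (List.getElem_take).symm
    exact hmin j hjn ⟨s.drop (j + 1), by
      rw [List.singleton_append, ← hgj]
      exact (List.drop_eq_getElem_cons hjlen).symm⟩
  · have ht1 : s.drop (n + 1) = t := by rw [← List.tail_drop, hd, List.tail_cons]
    conv_lhs => rw [← List.take_append_drop n s, hd, ← ht1]

theorem walkIdx_shift (x : List Char) (segs : List (List Char)) (cmds : List (String × List (String × List String))) (i : Nat) :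
    walkIdx (x :: segs) cmds (i + 1) = walkIdx segs cmds i + 1 := by
  fun_induction walkIdx segs cmds i with
  | case1 i h hres ih =>
    rw [walkIdx]
    simp only [List.length_cons]
    rw [dif_pos (by omega)]
    simp only [List.getElem_cons_succ]
    rw [if_pos hres, ih]
  | case2 i h hres =>
    rw [walkIdx]
    simp only [List.length_cons]
    rw [dif_pos (by omega)]
    simp only [List.getElem_cons_succ]
    rw [if_neg hres]
  | case3 i h =>
    rw [walkIdx]
    simp only [List.length_cons]
    rw [dif_neg (by omega)]

theorem walkIdx_singleton_zero (x : List Char) (cmds : List (String × List (String × List String))) :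
    walkIdx [x] cmds 0 = 0 := by
  rw [walkIdx]; simp

theorem walkIdx_zero_of_none (x : List Char) (segs : List (List Char)) (cmds : List (String × List (String × List String)))
    (h : ¬ (resolvePrefixPy x cmds).isSome) : walkIdx (x :: segs) cmds 0 = 0 := by
  rw [walkIdx]
  split
  · simp only [List.getElem_cons_zero]
    rw [if_neg h]
  · rfl

theorem walkIdx_zero_of_some (x : List Char) (segs : List (List Char)) (cmds : List (String × List (String × List String)))
    (hs : segs ≠ []) (h : (resolvePrefixPy x cmds).isSome) :
    walkIdx (x :: segs) cmds 0 = walkIdx segs cmds 0 + 1 := by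
  rw [walkIdx]
  have hlen : 0 < (x :: segs).length - 1 := by
    cases segs with
    | nil => exact absurd rfl hs
    | cons y ys => simp
  rw [dif_pos hlen]
  simp only [List.getElem_cons_zero]
  rw [if_pos h]
  exact walkIdx_shift x segs cmds 0

-- chainB expressed through splitPipe, with the slice evaluated
theorem chainB_eq (s : List Char) (cmds : List (String × List (String × List String))) :
    chainB s cmds =
      (match resolvePrefixPy (PySem.Chars.join ['|']
          ((splitPipe s).drop (walkIdx (splitPipe s) cmds 0))) cmds with
       | some m => m.2.1
       | none => PySem.Chars.join ['|']
          ((splitPipe s).drop (walkIdx (splitPipe s) cmds 0))) := by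
  rw [chainB]
  simp only [splitOn_pipe, PySem.List.slice_from_natCast]

theorem chain_eq_aux (n : Nat) : ∀ (s : List Char), s.length ≤ n →
    ∀ (cmds : List (String × List (String × List String))), chainA s cmds = chainB s cmds := by
  induction n with
  | zero =>
    intro s hs cmds
    have hnil : s = [] := by cases s with | nil => rfl | cons c t => simp at hs
    subst hnil
    rw [chainA, chainB_eq]
    have h1 : PySem.Chars.find ([] : List Char) ['|'] = -1 := by decide
    rw [dif_pos h1]
    simp [splitPipe, walkIdx_singleton_zero, PySem.Chars.join_singleton, finalA]
  | succ n ih =>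
    intro s hs cmds
    rw [chainA, chainB_eq]
    by_cases h1 : PySem.Chars.find s ['|'] = -1
    · rw [dif_pos h1]
      have hs1 : splitPipe s = [s] := splitPipe_no_pipe s (find_pipe_neg s h1)
      rw [hs1, walkIdx_singleton_zero]
      simp [PySem.Chars.join_singleton, finalA]
    · rw [dif_neg h1]
      have h0 : (0:Int) ≤ PySem.Chars.find s ['|'] := by
        have := PySem.Chars.neg_one_le_find s ['|']; omega
      obtain ⟨hnp, hdec⟩ := find_pipe_decomp s h1
      set p := PySem.Chars.find s ['|'] with hp
      set a := s.take p.toNat with ha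
      set b := s.drop (p.toNat + 1) with hb
      have hsplit : splitPipe s = a :: splitPipe b := by
        conv_lhs => rw [hdec]
        exact splitPipe_append a b hnp
      have hcand : PySem.Chars.slice s none (some p) = a := by
        simp only [PySem.Chars.slice_eq_listSlice, PySem.List.slice_to s h0]
        exact ha.symm
      by_cases hres : (resolvePrefixPy a cmds).isSome
      · rw [hcand, if_pos hres]
        have hrest : PySem.Chars.slice s (some (p + 1)) none = b := by
          simp only [PySem.Chars.slice_eq_listSlice,
            PySem.List.slice_from s (show (0:Int) ≤ p + 1 by omega)]
          rw [hb]
          congr 1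
          omega
        rw [hrest]
        have hblen : b.length ≤ n := by
          have hlen : s.length = a.length + 1 + b.length := by
            conv_lhs => rw [hdec]
            simp only [List.length_append, List.length_cons]
            omega
          omega
        rw [ih b hblen cmds, chainB_eq]
        rw [hsplit, walkIdx_zero_of_some a (splitPipe b) cmds (splitPipe_ne_nil b) hres]
        simp only [List.drop_succ_cons]
      · rw [hcand, if_neg hres]
        rw [hsplit, walkIdx_zero_of_none a (splitPipe b) cmds hres]
        rw [← hsplit]
        simp only [List.drop_zero, joinPipe, finalA]

-- ===== VERDICT (by name: the statement is the Claim_ definition above) =====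
theorem extract_chain_payload_py_spec : Claim_equal_extract_chain_payload_py := by
  intro text commands _
  unfold Spec_extract_chain_payload_py extract_chain_payload_py extract_chain_payload_py_alt
  rw [chain_eq_aux text.toList.length text.toList le_rfl commands]
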